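-- pv_equiv track=rewrite | github.com/arisongha/algorithm | hackerrank/strings/marsExploration.py | marsExploration
-- ===== SOURCE A (Python) =====
-- def marsExploration(s):
--     sos_cnt = len(s) // 3
--     sos = "SOS" * sos_cnt
--     result = 0
--     for a,b in zip(s,sos):
--         if a is not b:
--             result += 1
--     return result
-- ===== SOURCE B (Python) =====
-- def marsExploration(s):
--     # Index loop in strides of 3: no repeated pattern string, no zip.
--     result = 0
--     i = 0
--     n = len(s)
--     while i + 3 <= n:
--         result += (s[i] != 'S') + (s[i+1] != 'O') + (s[i+2] != 'S')
--         i += 3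
--     return result
-- ===== Notes on version B (the rewrite author's own statement) =====
-- stated objective: simpler
-- what changed: Replaces building a repeated 'SOS' pattern string and zipping it against s with a direct index loop in strides of 3 that compares each block's three characters to 'S','O','S' by a per-chunk formula.
import Mathlib
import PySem

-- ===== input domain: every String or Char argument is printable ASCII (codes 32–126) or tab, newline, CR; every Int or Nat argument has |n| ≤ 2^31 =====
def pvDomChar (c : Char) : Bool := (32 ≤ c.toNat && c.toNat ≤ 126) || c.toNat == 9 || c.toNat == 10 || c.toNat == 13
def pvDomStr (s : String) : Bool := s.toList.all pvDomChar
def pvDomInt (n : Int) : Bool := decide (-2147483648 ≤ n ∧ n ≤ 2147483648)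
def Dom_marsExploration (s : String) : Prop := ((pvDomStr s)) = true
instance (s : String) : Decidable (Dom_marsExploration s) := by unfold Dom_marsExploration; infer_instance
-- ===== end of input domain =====

-- B replaces the repeated-"SOS"-pattern + zip compare with a stride-3 index loop and a per-chunk
-- formula (objective: simpler).
-- Note: A's `a is not b` compares identity; on the ASCII domain CPython interns 1-char strings, so
-- it behaves exactly as `!=`, ported as ≠.

-- ===== PORT A =====
def marsExploration (s : String) : Int :=
  let sosCnt : Int := PySem.Int.floordiv (s.toList.length : Int) 3
  let sos : List Char := PySem.List.pyRepeat "SOS".toList sosCnt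
  (s.toList.zip sos).foldl (fun result ab => if ab.1 ≠ ab.2 then result + 1 else result) 0

-- ===== PORT B =====
-- the while loop of Source B; s[i], s[i+1], s[i+2] are always in range (i+3 ≤ n), so pyGetD is exact
def marsAltLoop (l : List Char) (n : Nat) (result : Int) (i : Nat) : Int :=
  if i + 3 ≤ n then
    marsAltLoop l n
      (result + ((if PySem.List.pyGetD l (i : Int) ' ' ≠ 'S' then 1 else 0)
               + (if PySem.List.pyGetD l ((i : Int) + 1) ' ' ≠ 'O' then 1 else 0)
               + (if PySem.List.pyGetD l ((i : Int) + 2) ' ' ≠ 'S' then 1 else 0))) (i + 3)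
  else result
termination_by n - i

def marsExploration_alt (s : String) : Int :=
  marsAltLoop s.toList s.toList.length 0 0

-- ===== PRECONDITION & SPEC =====
def Spec_marsExploration (s : String) (out : Int) : Prop := out = marsExploration_alt s
instance (s : String) (out : Int) : Decidable (Spec_marsExploration s out) := by unfold Spec_marsExploration; infer_instance

-- ===== CLAIM (what is proved, stated in full; the proofs are below) =====
def Claim_equal_marsExploration : Prop := ∀ (s : String), Dom_marsExploration s → Spec_marsExploration s (marsExploration s)

-- ===== LEMMAS AND PROOFS =====

-- common reference: mismatch count, three characters at a time
def chunks3 : List Char → Int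
  | a :: b :: c :: rest =>
      (if a ≠ 'S' then 1 else 0) + (if b ≠ 'O' then 1 else 0) + (if c ≠ 'S' then 1 else 0) + chunks3 rest
  | _ => 0

lemma chunks3_short (t : List Char) (h : t.length < 3) : chunks3 t = 0 := by
  match t with
  | [] => rfl
  | [_] => rfl
  | [_, _] => rfl
  | _ :: _ :: _ :: _ => simp at h; omega

lemma portA_eq_chunks3 (l : List Char) :
    (l.zip (PySem.List.pyRepeat "SOS".toList (PySem.Int.floordiv (l.length : Int) 3))).foldl
      (fun result ab => if ab.1 ≠ ab.2 then result + 1 else result) 0 = chunks3 l := by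
  induction l using chunks3.induct with
  | case1 a b c rest ih =>
      rw [PySem.List.foldl_ite_add_one (fun ab : Char × Char => ab.1 ≠ ab.2)] at ih ⊢
      have hdiv : PySem.Int.floordiv (((a :: b :: c :: rest).length : Nat) : Int) 3
          = ((rest.length / 3 + 1 : Nat) : Int) := by
        rw [show (3:Int) = ((3:Nat):Int) by norm_num, PySem.Int.floordiv_natCast]
        congr 1
        simp only [List.length_cons]
        omega
      have hdiv' : PySem.Int.floordiv ((rest.length : Nat) : Int) 3
          = ((rest.length / 3 : Nat) : Int) := by
        rw [show (3:Int) = ((3:Nat):Int) by norm_num, PySem.Int.floordiv_natCast]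
      rw [hdiv]
      rw [hdiv'] at ih
      simp only [PySem.List.pyRepeat, Int.toNat_natCast, List.replicate_succ,
        List.flatten_cons] at ih ⊢
      rw [show "SOS".toList = ['S', 'O', 'S'] from by decide] at ih ⊢
      simp only [List.cons_append, List.nil_append, List.zip_cons_cons, List.countP_cons]
      rw [chunks3, ← ih]
      by_cases h1 : a = 'S' <;> by_cases h2 : b = 'O' <;> by_cases h3 : c = 'S' <;>
        simp [h1, h2, h3] <;> omega
  | case2 t ht =>
      have h0 : chunks3 t = 0 := by
        match t, ht with
        | [], _ => rfl
        | [_], _ => rfl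
        | [_, _], _ => rfl
        | a :: b :: c :: r, ht => exact absurd rfl (ht a b c r)
      rw [h0]
      match t, ht with
      | [], _ => rfl
      | [a], _ =>
          norm_num [PySem.Int.floordiv, PySem.List.pyRepeat,
            show Int.fdiv 1 3 = 0 from by decide]
      | [a, b], _ =>
          norm_num [PySem.Int.floordiv, PySem.List.pyRepeat,
            show Int.fdiv 2 3 = 0 from by decide]
      | a :: b :: c :: r, ht => exact absurd rfl (ht a b c r)

lemma loop_eq_chunks3 (l : List Char) (n : Nat) (hn : n = l.length) (result : Int) (i : Nat) :
    marsAltLoop l n result i = result + chunks3 (l.drop i) := by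
  induction result, i using marsAltLoop.induct l n with
  | case1 result i h ih =>
      simp only [dite_eq_ite] at ih
      rw [marsAltLoop, if_pos h, ih]
      have h0 : i < l.length := by omega
      have h1 : i + 1 < l.length := by omega
      have h2 : i + 2 < l.length := by omega
      have hd : l.drop i = l[i] :: l[i+1] :: l[i+2] :: l.drop (i+3) := by
        rw [List.drop_eq_getElem_cons h0, List.drop_eq_getElem_cons h1, List.drop_eq_getElem_cons h2]
      have g0 : PySem.List.pyGetD l (i : Int) ' ' = l[i] := by
        rw [PySem.List.pyGetD_natCast]; exact List.getD_eq_getElem l ' ' h0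
      have g1 : PySem.List.pyGetD l ((i : Int) + 1) ' ' = l[i+1] := by
        rw [show ((i:Int)+1) = ((i+1 : Nat) : Int) by push_cast; ring, PySem.List.pyGetD_natCast]
        exact List.getD_eq_getElem l ' ' h1
      have g2 : PySem.List.pyGetD l ((i : Int) + 2) ' ' = l[i+2] := by
        rw [show ((i:Int)+2) = ((i+2 : Nat) : Int) by push_cast; ring, PySem.List.pyGetD_natCast]
        exact List.getD_eq_getElem l ' ' h2
      rw [hd, chunks3, g0, g1, g2]
      ring
  | case2 result i h =>
      rw [marsAltLoop, if_neg h, chunks3_short]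
      · ring
      · simp only [List.length_drop]
        omega

-- ===== VERDICT (by name: the statement is the Claim_ definition above) =====
theorem marsExploration_spec : Claim_equal_marsExploration := by
  intro s _
  unfold Spec_marsExploration marsExploration marsExploration_alt
  rw [portA_eq_chunks3, loop_eq_chunks3 _ _ rfl]
  simp
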